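-- pv_equiv track=rewrite | github.com/HyosikMoon/Algorithms | Python/DailyCoding/220616_ThreeWords.py | threeWords
-- ===== SOURCE A (Python) =====
-- def threeWords(str):
--     lst = str.split()
--     cnt = 0
--     for w in lst:
--         if w[0] in '1234567890':
--             cnt = 0; continue
--         else:
--             cnt += 1
--             if cnt >= 3: return True
--     return False
-- ===== SOURCE B (Python) =====
-- def threeWords(str):
--     kinds = ''.join('n' if w[0] in '1234567890' else 'w' for w in str.split())
--     return 'www' in kinds
-- ===== Notes on version B (the rewrite author's own statement) =====
-- stated objective: alternative
-- what changed: Replaces the reset-on-hit counter loop with a classification pass (each word mapped to a kind character) followed by a substring search for a run of three non-numeric kind characters.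
import Mathlib
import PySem

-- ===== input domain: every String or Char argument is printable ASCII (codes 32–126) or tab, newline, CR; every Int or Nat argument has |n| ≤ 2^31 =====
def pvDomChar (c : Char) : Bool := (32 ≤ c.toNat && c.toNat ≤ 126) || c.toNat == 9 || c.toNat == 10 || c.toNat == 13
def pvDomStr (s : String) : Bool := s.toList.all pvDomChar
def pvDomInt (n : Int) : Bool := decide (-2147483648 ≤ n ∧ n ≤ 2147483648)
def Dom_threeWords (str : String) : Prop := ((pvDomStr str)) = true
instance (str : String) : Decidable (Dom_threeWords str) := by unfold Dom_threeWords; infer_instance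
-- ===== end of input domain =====

-- B replaces A's reset-on-hit counter loop by mapping each word to a kind character
-- ('n' for digit-led, 'w' otherwise) and substring-searching for a run of three non-numeric kind characters (alternative decomposition).


-- ===== PORT A =====
-- the for-loop of A; cnt is the running count of consecutive non-digit-led words
def threeWords_loop : List String → Int → Bool
  | [], _ => false
  | w :: ws, cnt =>
    match PySem.List.pyGet? w.toList 0 with
    | none => false   -- w[0] would raise IndexError; unreachable: split() words are nonempty
    | some c =>
      if PySem.Chars.isIn [c] "1234567890".toList then
        threeWords_loop ws 0
      else
        if cnt + 1 ≥ 3 then true else threeWords_loop ws (cnt + 1)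

def threeWords (str : String) : Bool :=
  threeWords_loop (PySem.Str.split₀ str) 0

-- ===== PORT B =====
-- 'n' if w[0] in '1234567890' else 'w'
def kindChar (w : String) : Char :=
  match PySem.List.pyGet? w.toList 0 with
  | none => 'w'   -- w[0] would raise IndexError; unreachable: split() words are nonempty
  | some c => if PySem.Chars.isIn [c] "1234567890".toList then 'n' else 'w'

def threeWords_alt (str : String) : Bool :=
  let kinds := PySem.Chars.join [] ((PySem.Str.split₀ str).map (fun w => [kindChar w]))
  PySem.Chars.isIn ['w', 'w', 'w'] kinds

-- ===== PRECONDITION & SPEC =====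
def Spec_threeWords (str : String) (out : Bool) : Prop := out = threeWords_alt str
instance (str : String) (out : Bool) : Decidable (Spec_threeWords str out) := by unfold Spec_threeWords; infer_instance

-- ===== CLAIM (what is proved, stated in full; the proofs are below) =====
def Claim_equal_threeWords : Prop := ∀ (str : String), Dom_threeWords str → Spec_threeWords str (threeWords str)

-- ===== LEMMAS AND PROOFS =====

-- every word produced by split() is nonempty
lemma split₀_go_ne_nil (s : List Char) :
    ∀ (cur : List Char) (acc : List (List Char)),
      (∀ w ∈ acc, w ≠ []) → ∀ w ∈ PySem.Chars.split₀.go s cur acc, w ≠ [] := by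
  induction s with
  | nil =>
    intro cur acc hacc w hw
    simp only [PySem.Chars.split₀.go] at hw
    split at hw
    · exact hacc w (List.mem_reverse.mp hw)
    · rcases List.mem_cons.mp (List.mem_reverse.mp hw) with h | h
      · subst h
        rename_i hcur
        simpa [List.isEmpty_iff] using hcur
      · exact hacc w h
  | cons c rest ih =>
    intro cur acc hacc w hw
    simp only [PySem.Chars.split₀.go] at hw
    split at hw
    · split at hw
      · exact ih [] acc hacc w hw
      · refine ih [] (cur.reverse :: acc) ?_ w hw
        intro u hu
        rcases List.mem_cons.mp hu with h | h
        · subst h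
          rename_i hcur
          simpa [List.isEmpty_iff] using hcur
        · exact hacc u h
    · exact ih (c :: cur) acc hacc w hw

lemma split₀_words_ne_nil (str : String) :
    ∀ w ∈ PySem.Str.split₀ str, w.toList ≠ [] := by
  intro w hw
  simp only [PySem.Str.split₀, List.mem_map] at hw
  obtain ⟨cs, hcs, rfl⟩ := hw
  have := split₀_go_ne_nil str.toList [] [] (by simp) cs
    (by simpa [PySem.Chars.split₀] using hcs)
  simpa using this

lemma replicate_w_prefix_mono {m n : ℕ} {l : List Char} (h : m ≤ n)
    (hp : List.replicate n 'w' <+: l) : List.replicate m 'w' <+: l := by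
  refine List.IsPrefix.trans ?_ hp
  exact ⟨List.replicate (n - m) 'w', by rw [← List.replicate_add]; congr 1; omega⟩

-- invariant of A's loop: it succeeds iff the kind list starts with 3-cnt 'w's
-- or contains "www" further in
lemma threeWords_loop_eq (ws : List String) :
    ∀ cnt : Int, 0 ≤ cnt → cnt ≤ 2 → (∀ w ∈ ws, w.toList ≠ []) →
      threeWords_loop ws cnt =
        decide (List.replicate (3 - cnt).toNat 'w' <+: ws.map kindChar ∨
                ['w', 'w', 'w'] <:+: ws.map kindChar) := by
  induction ws with
  | nil =>
    intro cnt h0 h2 _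
    have h1 : (3 - cnt).toNat ≠ 0 := by omega
    simp [threeWords_loop, List.prefix_nil, List.replicate_eq_nil_iff, h1]
  | cons w ws ih =>
    intro cnt h0 h2 hne
    have hwne : w.toList ≠ [] := hne w (by simp)
    obtain ⟨c, cs, hc⟩ := List.exists_cons_of_ne_nil hwne
    have hget : PySem.List.pyGet? w.toList 0 = some c := by
      simp [hc, PySem.List.pyGet?, PySem.List.pyIdx?]
    have hds : "1234567890".toList = ['1','2','3','4','5','6','7','8','9','0'] := rfl
    have hkind : kindChar w =
        (if PySem.Chars.isIn [c] "1234567890".toList then 'n' else 'w') := by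
      simp [kindChar, hget]
    rw [hds] at hkind
    have hrest : ∀ u ∈ ws, u.toList ≠ [] := fun u hu => hne u (by simp [hu])
    by_cases hd : PySem.Chars.isIn [c] ['1','2','3','4','5','6','7','8','9','0'] = true
    · -- digit-led word: counter resets, kind char is 'n'
      have hstep : threeWords_loop (w :: ws) cnt = threeWords_loop ws 0 := by
        simp only [threeWords_loop, hget, hds, hd, if_true]
      rw [hstep, ih 0 (by omega) (by omega) hrest]
      have hk : kindChar w = 'n' := by simp [hkind, hd]
      simp only [List.map_cons, hk]
      apply decide_eq_decide.mpr
      obtain ⟨m, hm⟩ : ∃ m, (3 - cnt).toNat = m + 1 := ⟨(3 - cnt).toNat - 1, by omega⟩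
      constructor
      · rintro (hp | hi)
        · refine Or.inr (List.infix_cons_iff.mpr (Or.inr ?_))
          simpa [List.replicate] using hp.isInfix
        · exact Or.inr (List.infix_cons_iff.mpr (Or.inr hi))
      · rintro (hp | hi)
        · exfalso
          rw [hm, List.replicate_succ] at hp
          exact absurd (List.cons_prefix_cons.mp hp).1 (by decide)
        · rcases List.infix_cons_iff.mp hi with hp | hi'
          · exact absurd (List.cons_prefix_cons.mp hp).1 (by decide)
          · exact Or.inr hi'
    · -- non-digit word: counter increments, kind char is 'w'
      have hk : kindChar w = 'w' := by simp [hkind, hd]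
      by_cases h3 : cnt + 1 ≥ 3
      · have hcnt : cnt = 2 := by omega
        have hstep : threeWords_loop (w :: ws) cnt = true := by
          simp only [threeWords_loop, hget, hds, hd]
          simp [h3]
        rw [hstep]
        subst hcnt
        simp [hk]
      · have : threeWords_loop (w :: ws) cnt = threeWords_loop ws (cnt + 1) := by
          simp [threeWords_loop, hget, hd, h3]
        rw [this, ih (cnt + 1) (by omega) (by omega) hrest]
        simp only [List.map_cons, hk]
        apply decide_eq_decide.mpr
        have hm : (3 - cnt).toNat = (3 - (cnt + 1)).toNat + 1 := by omega
        rw [hm, List.replicate_succ]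
        constructor
        · rintro (hp | hi)
          · exact Or.inl (List.cons_prefix_cons.mpr ⟨rfl, hp⟩)
          · exact Or.inr (List.infix_cons_iff.mpr (Or.inr hi))
        · rintro (hp | hi)
          · exact Or.inl (List.cons_prefix_cons.mp hp).2
          · rcases List.infix_cons_iff.mp hi with hp | hi'
            · have h2p : List.replicate 2 'w' <+: ws.map kindChar := by
                have := (List.cons_prefix_cons.mp hp).2
                simpa [List.replicate] using this
              exact Or.inl (replicate_w_prefix_mono (by omega) h2p)
            · exact Or.inr hi'

lemma threeWords_alt_eq (str : String) :
    threeWords_alt str =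
      PySem.Chars.isIn ['w', 'w', 'w'] ((PySem.Str.split₀ str).map kindChar) := by
  simp only [threeWords_alt]
  congr 1
  rw [show ((PySem.Str.split₀ str).map (fun w => [kindChar w])) =
      (((PySem.Str.split₀ str).map kindChar).map (fun c => [c])) by
    simp [List.map_map]]
  exact PySem.Chars.join_nil_singletons _

-- ===== VERDICT (by name: the statement is the Claim_ definition above) =====
theorem threeWords_spec : Claim_equal_threeWords := by
  intro str _
  unfold Spec_threeWords threeWords
  rw [threeWords_loop_eq (PySem.Str.split₀ str) 0 (by omega) (by omega)
    (split₀_words_ne_nil str)]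
  rw [threeWords_alt_eq]
  rcases h : PySem.Chars.isIn ['w', 'w', 'w'] ((PySem.Str.split₀ str).map kindChar) with _ | _
  · have hni := (PySem.Chars.isIn_eq_false_iff _ _).mp h
    have hnp : ¬ ['w', 'w', 'w'] <+: (PySem.Str.split₀ str).map kindChar :=
      fun hp => hni hp.isInfix
    simp [hnp, hni]
  · have hi := (PySem.Chars.isIn_iff_infix _ _).mp h
    simp [hi]
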